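-- pv_equiv track=rewrite | github.com/deep0892/Algorithms_Practice | Leetcode/Microsoft_OA_2019/Number_with_Equal_Digit_Sum.py | count
-- ===== SOURCE A (Python) =====
-- def digit_sum(n):
--     sum = 0
--     while(n>0):
--         sum += n%10
--         n //=10
--     return sum
--
-- def count(arr):
--     digit_sum_map = {}
--     max_sum = -1
--     for el in arr:
--         dsum = digit_sum(el)
--         if dsum in digit_sum_map:
--             max_sum = max(max_sum, el+digit_sum_map[dsum])
--             digit_sum_map[dsum] = max(digit_sum_map[dsum],el)
--         else:
--             digit_sum_map[dsum] = el
--     return max_sum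
-- ===== SOURCE B (Python) =====
-- def digit_sum(n):
--     s = 0
--     while n > 0:
--         s += n % 10
--         n //= 10
--     return s
--
-- def _best_pair(b):
--     # sum of two largest elements of b (len(b) >= 2), one scan
--     m1, m2 = (b[0], b[1]) if b[0] >= b[1] else (b[1], b[0])
--     for x in b[2:]:
--         if x > m1:
--             m1, m2 = x, m1
--         elif x > m2:
--             m2 = x
--     return m1 + m2
--
-- def count(arr):
--     buckets = {}
--     for el in arr:
--         buckets.setdefault(digit_sum(el), []).append(el)
--     ans = -1
--     for b in buckets.values():
--         if len(b) >= 2: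
--             ans = max(ans, _best_pair(b))
--     return ans
-- ===== Notes on version B (the rewrite author's own statement) =====
-- stated objective: alternative
-- what changed: A keeps only the running maximum per digit-sum and updates the best pair sum inside the single pass; B instead groups all elements into digit-sum buckets in one pass and then, in a separate pass over the buckets, takes the sum of the two largest elements of each bucket with at least two members.
import Mathlib
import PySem

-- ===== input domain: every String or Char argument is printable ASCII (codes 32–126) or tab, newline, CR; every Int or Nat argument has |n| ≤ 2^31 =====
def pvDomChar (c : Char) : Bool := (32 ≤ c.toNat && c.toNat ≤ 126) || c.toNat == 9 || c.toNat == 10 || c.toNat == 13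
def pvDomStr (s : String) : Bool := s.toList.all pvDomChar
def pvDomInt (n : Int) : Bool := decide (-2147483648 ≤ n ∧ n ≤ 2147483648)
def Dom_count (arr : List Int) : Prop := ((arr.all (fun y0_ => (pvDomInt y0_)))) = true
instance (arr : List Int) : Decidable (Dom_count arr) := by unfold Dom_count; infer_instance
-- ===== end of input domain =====

-- B groups the elements into digit-sum buckets and takes, per bucket, the sum of its
-- two largest elements in a separate pass (objective: alternative decomposition, same asymptotic cost).

-- ===== PORT A =====
-- while(n>0): sum += n%10; n //= 10
def digitSumLoop (n s : Int) : Int :=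
  if 0 < n then digitSumLoop (PySem.Int.floordiv n 10) (s + PySem.Int.mod n 10) else s
  termination_by n.toNat
  decreasing_by
    rw [PySem.Int.floordiv_eq_ediv_of_pos (by omega)]
    omega

def digitSum (n : Int) : Int := digitSumLoop n 0

-- body of A's loop: state = (digit_sum_map, max_sum)
def stepA (st : PySem.Dict Int Int × Int) (el : Int) : PySem.Dict Int Int × Int :=
  let dsum := digitSum el
  match st.1.get? dsum with
  | some v => (st.1.insert dsum (max v el), max st.2 (el + v))
  | none => (st.1.insert dsum el, st.2)

def count (arr : List Int) : Int :=
  (arr.foldl stepA ((PySem.Dict.empty : PySem.Dict Int Int), -1)).2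

-- ===== PORT B =====
-- inner loop of _best_pair
def bpStep (p : Int × Int) (x : Int) : Int × Int :=
  if p.1 < x then (x, p.1) else if p.2 < x then (p.1, x) else p

-- _best_pair: only applied to lists with at least two elements (Python would raise otherwise)
def bestPair (b : List Int) : Int :=
  match b with
  | x :: y :: rest =>
    let p : Int × Int := if y ≤ x then (x, y) else (y, x)
    let q := rest.foldl bpStep p
    q.1 + q.2
  | _ => 0

-- body of B's populate loop: buckets.setdefault(digit_sum(el), []).append(el)
def stepB (d : PySem.Dict Int (List Int)) (el : Int) : PySem.Dict Int (List Int) :=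
  let k := digitSum el
  match d.get? k with
  | some l => d.insert k (l ++ [el])
  | none => d.insert k [el]

-- body of B's bucket loop
def bucketStep (ans : Int) (b : List Int) : Int :=
  if 2 ≤ b.length then max ans (bestPair b) else ans

def count_alt (arr : List Int) : Int :=
  (arr.foldl stepB (PySem.Dict.empty : PySem.Dict Int (List Int))).values.foldl bucketStep (-1)

-- ===== PRECONDITION & SPEC =====
def Spec_count (arr : List Int) (out : Int) : Prop := out = count_alt arr
instance (arr : List Int) (out : Int) : Decidable (Spec_count arr out) := by unfold Spec_count; infer_instance

-- ===== CLAIM (what is proved, stated in full; the proofs are below) =====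
def Claim_equal_count : Prop := ∀ (arr : List Int), Dom_count arr → Spec_count arr (count arr)

-- ===== LEMMAS AND PROOFS =====

-- maximum of a nonempty list, as A maintains it per key (junk 0 on [])
def lmax : List Int → Int
  | [] => 0
  | h :: t => t.foldl max h

-- the relation between A's state (dA, m) and B's buckets dB after any prefix of arr
def StateInv (dA : PySem.Dict Int Int) (m : Int) (dB : PySem.Dict Int (List Int)) : Prop :=
  dA.items = dB.items.map (fun p => (p.1, lmax p.2)) ∧
  (∀ p ∈ dB.items, p.2 ≠ []) ∧
  dB.keys.Nodup ∧
  m = dB.values.foldl bucketStep (-1)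

theorem le_foldl_bucketStep (bs : List (List Int)) (acc : Int) :
    acc ≤ bs.foldl bucketStep acc := by
  induction bs generalizing acc with
  | nil => simp
  | cons b bs ih =>
    refine le_trans ?_ (ih (bucketStep acc b))
    unfold bucketStep; split <;> omega

theorem foldl_bucketStep_hoist (bs : List (List Int)) (acc : Int) (h : -1 ≤ acc) :
    bs.foldl bucketStep acc = max acc (bs.foldl bucketStep (-1)) := by
  induction bs generalizing acc with
  | nil => simpa using by omega
  | cons b bs ih =>
    have h1 : -1 ≤ bucketStep acc b := by unfold bucketStep; split <;> omega
    have h2 : (-1 : Int) ≤ bucketStep (-1) b := by unfold bucketStep; split <;> omega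
    simp only [List.foldl_cons]
    rw [ih _ h1, ih _ h2]
    have : bucketStep acc b = max acc (bucketStep (-1) b) := by
      unfold bucketStep; split <;> omega
    omega

theorem bp_inv (rest : List Int) : ∀ p : Int × Int, p.2 ≤ p.1 →
    (rest.foldl bpStep p).2 ≤ (rest.foldl bpStep p).1 ∧
    (rest.foldl bpStep p).1 = rest.foldl max p.1 := by
  induction rest with
  | nil => intro p h; simpa using h
  | cons x rest ih =>
    intro p h
    simp only [List.foldl_cons]
    have hstep : (bpStep p x).2 ≤ (bpStep p x).1 ∧ (bpStep p x).1 = max p.1 x := by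
      unfold bpStep; split
      · simp; omega
      · split <;> simp <;> omega
    obtain ⟨h1, h2⟩ := hstep
    obtain ⟨h3, h4⟩ := ih (bpStep p x) h1
    exact ⟨h3, by rw [h4, h2]⟩

theorem bestPair_two (y el : Int) : bestPair [y, el] = y + el := by
  show (if el ≤ y then ((y, el) : Int × Int) else (el, y)).1 +
      (if el ≤ y then ((y, el) : Int × Int) else (el, y)).2 = y + el
  split <;> simp [Int.add_comm]

theorem bestPair_append (x y : Int) (rest : List Int) (el : Int) :
    bestPair ((x :: y :: rest) ++ [el]) =
      max (bestPair (x :: y :: rest)) (el + lmax (x :: y :: rest)) := by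
  have hp : ∀ p : Int × Int, p = (if y ≤ x then ((x, y) : Int × Int) else (y, x)) →
      p.2 ≤ p.1 ∧ p.1 = max x y := by
    intro p hpe; subst hpe; split <;> constructor <;> simp <;> omega
  obtain ⟨hple, hp1⟩ := hp _ rfl
  obtain ⟨hq2, hq1⟩ := bp_inv rest _ hple
  have hlm : lmax (x :: y :: rest) = rest.foldl max (max x y) := by
    simp [lmax]
  show bestPair (x :: y :: (rest ++ [el])) = _
  unfold bestPair
  simp only [List.foldl_append, List.foldl_cons, List.foldl_nil]
  set q := rest.foldl bpStep (if y ≤ x then ((x, y) : Int × Int) else (y, x)) with hqdef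
  have hq1' : q.1 = lmax (x :: y :: rest) := by rw [hlm, ← hp1, hq1]
  rw [← hq1']
  unfold bpStep
  split
  · simp; omega
  · split <;> simp <;> omega

theorem lmax_append (l : List Int) (hl : l ≠ []) (el : Int) :
    lmax (l ++ [el]) = max (lmax l) el := by
  cases l with
  | nil => exact absurd rfl hl
  | cons h t => simp [lmax, List.foldl_append]

theorem stInv_empty : StateInv PySem.Dict.empty (-1) PySem.Dict.empty := by
  refine ⟨rfl, ?_, PySem.Dict.nodup_keys_empty, rfl⟩
  rintro p hp
  rw [show (PySem.Dict.empty : PySem.Dict Int (List Int)).items = [] from rfl] at hp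
  cases hp

theorem keys_of_inv (dA : PySem.Dict Int Int) (m : Int) (dB : PySem.Dict Int (List Int))
    (h : StateInv dA m dB) : dA.keys = dB.keys := by
  obtain ⟨hitems, -, -, -⟩ := h
  show dA.items.map (·.1) = dB.items.map (·.1)
  rw [hitems, List.map_map]; rfl

theorem stInv_step (dA : PySem.Dict Int Int) (m : Int) (dB : PySem.Dict Int (List Int)) (el : Int)
    (h : StateInv dA m dB) :
    StateInv (stepA (dA, m) el).1 (stepA (dA, m) el).2 (stepB dB el) := by
  obtain ⟨hitems, hne, hnd, hm⟩ := h
  have hkeys := keys_of_inv dA m dB ⟨hitems, hne, hnd, hm⟩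
  have hndA : dA.keys.Nodup := by rw [hkeys]; exact hnd
  set k := digitSum el with hk
  cases hg : dB.get? k with
  | none =>
    have hgA : dA.get? k = none := by
      rw [PySem.Dict.get?_eq_none_iff_not_mem_keys, hkeys]
      exact (PySem.Dict.get?_eq_none_iff_not_mem_keys dB k).mp hg
    have hcB : dB.contains k = false := by
      rw [PySem.Dict.contains_eq_isSome_get?, hg]; rfl
    have hcA : dA.contains k = false := by
      rw [PySem.Dict.contains_eq_isSome_get?, hgA]; rfl
    unfold stepA stepB
    simp only [← hk, hg, hgA]
    refine ⟨?_, ?_, PySem.Dict.nodup_keys_insert _ _ _ hnd, ?_⟩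
    · rw [PySem.Dict.items_insert_of_not_contains _ _ hcA,
        PySem.Dict.items_insert_of_not_contains _ _ hcB, List.map_append, hitems]
      simp [lmax]
    · intro p hp
      rw [PySem.Dict.items_insert_of_not_contains _ _ hcB] at hp
      rcases List.mem_append.mp hp with hp | hp
      · exact hne p hp
      · simp at hp; subst hp; simp
    · show m = _
      have : (dB.insert k [el]).values = dB.values ++ [[el]] := by
        show (dB.insert k [el]).items.map (·.2) = dB.items.map (·.2) ++ _
        rw [PySem.Dict.items_insert_of_not_contains _ _ hcB]; simp
      rw [this, List.foldl_append]
      simp only [List.foldl_cons, List.foldl_nil]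
      rw [show bucketStep (dB.values.foldl bucketStep (-1)) [el]
            = dB.values.foldl bucketStep (-1) by unfold bucketStep; simp]
      exact hm
  | some l =>
    have hmemB : (k, l) ∈ dB.items := PySem.Dict.mem_items_of_get?_eq_some dB hg
    have hlne : l ≠ [] := hne (k, l) hmemB
    have hmemA : (k, lmax l) ∈ dA.items := by
      rw [hitems]; exact List.mem_map.mpr ⟨(k, l), hmemB, rfl⟩
    have hgA : dA.get? k = some (lmax l) := PySem.Dict.get?_of_mem_items dA hmemA hndA
    have hcB : dB.contains k = true := by
      rw [PySem.Dict.contains_eq_isSome_get?, hg]; rfl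
    have hcA : dA.contains k = true := by
      rw [PySem.Dict.contains_eq_isSome_get?, hgA]; rfl
    unfold stepA stepB
    simp only [← hk, hg, hgA]
    refine ⟨?_, ?_, PySem.Dict.nodup_keys_insert _ _ _ hnd, ?_⟩
    · rw [PySem.Dict.items_insert_of_contains _ _ hcA,
        PySem.Dict.items_insert_of_contains _ _ hcB, hitems, List.map_map, List.map_map]
      refine List.map_congr_left ?_
      intro p hp
      by_cases hpk : p.1 = k
      · simp [hpk, lmax_append l hlne el]
      · simp [hpk]
    · intro p hp
      rw [PySem.Dict.items_insert_of_contains _ _ hcB] at hp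
      obtain ⟨q, hq, hqe⟩ := List.mem_map.mp hp
      by_cases hqk : q.1 = k
      · simp [hqk] at hqe; subst hqe; simp
      · simp [hqk] at hqe; subst hqe; exact hne q hq
    · -- max-sum invariant
      obtain ⟨pre, post, hsplit⟩ := List.append_of_mem hmemB
      have hndk : k ∉ pre.map (·.1) ∧ k ∉ post.map (·.1) := by
        have hthis : (dB.items.map (·.1)).Nodup := hnd
        rw [hsplit, List.map_append, List.map_cons, List.nodup_append] at hthis
        obtain ⟨-, hndc, hdisj⟩ := hthis
        exact ⟨fun h => hdisj k h k List.mem_cons_self rfl, (List.nodup_cons.mp hndc).1⟩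
      have hitemsB' : (dB.insert k (l ++ [el])).items = pre ++ (k, l ++ [el]) :: post := by
        rw [PySem.Dict.items_insert_of_contains _ _ hcB, hsplit, List.map_append, List.map_cons]
        congr 1
        · refine ((List.map_congr_left (fun q hq => ?_)).trans (List.map_id _))
          have : q.1 ≠ k := fun he => hndk.1 (List.mem_map.mpr ⟨q, hq, he⟩)
          simp [this]
        · congr 1
          · simp
          · refine ((List.map_congr_left (fun q hq => ?_)).trans (List.map_id _))
            have : q.1 ≠ k := fun he => hndk.2 (List.mem_map.mpr ⟨q, hq, he⟩)
            simp [this]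
      show max m (el + lmax l) = _
      have hvals : (dB.insert k (l ++ [el])).values
          = pre.map (·.2) ++ (l ++ [el]) :: post.map (·.2) := by
        show _root_.List.map _ _ = _
        rw [hitemsB']; simp
      have hvalsB : dB.values = pre.map (·.2) ++ l :: post.map (·.2) := by
        show _root_.List.map _ _ = _
        rw [hsplit]; simp
      set P := (pre.map (·.2)).foldl bucketStep (-1) with hP
      have hPge : -1 ≤ P := le_foldl_bucketStep _ _
      have hsplitFold : ∀ b : List Int, (pre.map (·.2) ++ b :: post.map (·.2)).foldl bucketStep (-1)
          = max (bucketStep P b) ((post.map (·.2)).foldl bucketStep (-1)) := by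
        intro b
        rw [List.foldl_append, ← hP]
        simp only [List.foldl_cons]
        refine foldl_bucketStep_hoist _ _ ?_
        have : P ≤ bucketStep P b := by unfold bucketStep; split <;> omega
        omega
      rw [hvals, hsplitFold, hm, hvalsB, hsplitFold]
      set Q := (post.map (·.2)).foldl bucketStep (-1) with hQ
      have hQge : -1 ≤ Q := le_foldl_bucketStep _ _
      cases l with
      | nil => exact absurd rfl hlne
      | cons x t =>
        cases t with
        | nil =>
          -- bucket had one element: new pair sum is x + el
          rw [show ([x] ++ [el]) = [x, el] by rfl]
          unfold bucketStep
          simp [bestPair_two x el, lmax]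
          omega
        | cons y rest =>
          have hbp := bestPair_append x y rest el
          unfold bucketStep
          simp only [List.length_append, List.length_cons, List.length_nil]
          rw [if_pos (by simp), if_pos (by omega)]
          rw [hbp]
          omega

theorem stInv_fold (arr : List Int) : ∀ (dA : PySem.Dict Int Int) (m : Int)
    (dB : PySem.Dict Int (List Int)), StateInv dA m dB →
    StateInv (arr.foldl stepA (dA, m)).1 (arr.foldl stepA (dA, m)).2 (arr.foldl stepB dB) := by
  induction arr with
  | nil => intro dA m dB h; exact h
  | cons el arr ih =>
    intro dA m dB h
    simp only [List.foldl_cons]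
    exact ih (stepA (dA, m) el).1 (stepA (dA, m) el).2 (stepB dB el) (stInv_step dA m dB el h)

-- ===== VERDICT (by name: the statement is the Claim_ definition above) =====
theorem count_spec : Claim_equal_count := by
  intro arr _
  show count arr = count_alt arr
  have h := stInv_fold arr PySem.Dict.empty (-1) PySem.Dict.empty stInv_empty
  exact h.2.2.2
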